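-- pv_equiv track=rewrite | github.com/luizrennocosta/comp1ufrj | listas/lista1/submissions/123692796_lista1.py | questao1
-- ===== SOURCE A (Python) =====
-- def questao1(n, ar):
--     cores = {}
--     pares = 0
--     for meia in ar:
--         if meia in cores:
--             cores[meia] += 1
--         else:
--             cores[meia] = 1
--     for cor, contagem in cores.items():
--         pares += contagem // 2
--
--     return pares
-- ===== SOURCE B (Python) =====
-- def questao1(n, ar):
--     impares = set()
--     pares = 0
--     for meia in ar:
--         if meia in impares:
--             impares.discard(meia)
--             pares += 1
--         else:
--             impares.add(meia)
--     return pares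
-- ===== Notes on version B (the rewrite author's own statement) =====
-- stated objective: alternative
-- what changed: Replaces the build-a-full-count-dict-then-sum-count//2-per-color structure with a single pass that toggles membership of each sock in a set of currently-unpaired socks, incrementing the pair counter when a match is found; no per-color counts and no //2 aggregation remain.
import Mathlib
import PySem

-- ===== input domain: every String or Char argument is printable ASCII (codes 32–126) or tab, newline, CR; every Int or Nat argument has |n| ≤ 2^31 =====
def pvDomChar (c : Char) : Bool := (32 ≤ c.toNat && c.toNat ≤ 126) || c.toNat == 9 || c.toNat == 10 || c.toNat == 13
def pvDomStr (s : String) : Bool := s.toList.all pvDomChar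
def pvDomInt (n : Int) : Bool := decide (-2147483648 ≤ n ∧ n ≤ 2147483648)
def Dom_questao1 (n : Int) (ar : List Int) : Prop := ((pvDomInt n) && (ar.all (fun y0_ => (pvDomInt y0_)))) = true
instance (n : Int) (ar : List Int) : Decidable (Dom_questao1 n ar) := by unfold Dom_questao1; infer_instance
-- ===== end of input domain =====

-- B replaces A's count-dict-then-sum-count//2 aggregation with a single pass toggling
-- membership in a set of currently-unpaired socks (alternative decomposition, same cost).


-- ===== PORT A =====
-- first loop: build the per-color count dict; second loop: sum count // 2 over its items
def questao1 (n : Int) (ar : List Int) : Int :=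
  ((ar.foldl (fun d meia =>
      if d.contains meia then d.insert meia (d.getD meia 0 + 1) else d.insert meia 1)
      (PySem.Dict.empty : PySem.Dict Int Int)).items).foldl
    (fun pares kv => pares + PySem.Int.floordiv kv.2 2) 0

-- ===== PORT B =====
-- single pass: toggle membership in the set of unpaired socks, count completed pairs
def questao1_alt (n : Int) (ar : List Int) : Int :=
  (ar.foldl (fun st meia =>
      if PySem.Set.contains st.1 meia then (PySem.Set.discard st.1 meia, st.2 + 1)
      else (PySem.Set.add st.1 meia, st.2))
    ((PySem.Set.empty : PySem.Set Int), (0 : Int))).2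

-- ===== PRECONDITION & SPEC =====
def Spec_questao1 (n : Int) (ar : List Int) (out : Int) : Prop := out = questao1_alt n ar
instance (n : Int) (ar : List Int) (out : Int) : Decidable (Spec_questao1 n ar out) := by unfold Spec_questao1; infer_instance

-- ===== CLAIM (what is proved, stated in full; the proofs are below) =====
def Claim_equal_questao1 : Prop := ∀ (n : Int) (ar : List Int), Dom_questao1 n ar → Spec_questao1 n ar (questao1 n ar)

-- ===== LEMMAS AND PROOFS =====

/-- Number of pairs in a list: per distinct element, its count halved. -/
def pairsF (l : List Int) : Nat := l.toFinset.sum (fun k => l.count k / 2)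

lemma pairsF_perm {l l' : List Int} (h : l.Perm l') : pairsF l = pairsF l' := by
  unfold pairsF
  rw [List.toFinset_eq_of_perm l l' h]
  exact Finset.sum_congr rfl (fun k _ => by rw [h.count_eq])

lemma pairsF_cons_cons (x : Int) (m : List Int) :
    pairsF (x :: x :: m) = pairsF m + 1 := by
  unfold pairsF
  have htf : (x :: x :: m).toFinset = insert x m.toFinset := by simp
  have hcx : (x :: x :: m).count x = m.count x + 2 := by simp
  have hck : ∀ k, k ≠ x → (x :: x :: m).count k = m.count k := by
    intro k hk
    simp [Ne.symm hk]
  rw [htf]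
  by_cases hx : x ∈ m.toFinset
  · rw [Finset.insert_eq_self.mpr hx]
    rw [← Finset.add_sum_erase _ _ hx, ← Finset.add_sum_erase _ (fun k => m.count k / 2) hx]
    have hrest : ∑ k ∈ m.toFinset.erase x, (x :: x :: m).count k / 2
         = ∑ k ∈ m.toFinset.erase x, m.count k / 2 :=
      Finset.sum_congr rfl (fun k hk => by rw [hck k (Finset.ne_of_mem_erase hk)])
    rw [hrest, hcx]
    omega
  · rw [Finset.sum_insert hx]
    have hcm : m.count x = 0 := by
      simpa using List.count_eq_zero_of_not_mem (by simpa using hx)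
    have hrest : ∑ k ∈ m.toFinset, (x :: x :: m).count k / 2
         = ∑ k ∈ m.toFinset, m.count k / 2 :=
      Finset.sum_congr rfl (fun k hk => by
        rw [hck k (by rintro rfl; exact hx hk)])
    rw [hrest, hcx, hcm]
    omega

lemma pairsF_nodup {s : List Int} (h : s.Nodup) : pairsF s = 0 := by
  unfold pairsF
  refine Finset.sum_eq_zero (fun k hk => ?_)
  rw [List.count_eq_one_of_mem h (List.mem_toFinset.mp hk)]
  decide

lemma questao1_eq_pairsF (n : Int) (ar : List Int) :
    questao1 n ar = (pairsF ar : Int) := by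
  unfold questao1
  have hfun : (fun (d : PySem.Dict Int Int) meia =>
      if d.contains meia then d.insert meia (d.getD meia 0 + 1) else d.insert meia 1)
      = (fun (d : PySem.Dict Int Int) meia => d.insert meia (d.getD meia 0 + 1)) := by
    funext d meia
    by_cases h : d.contains meia
    · simp [h]
    · simp only [Bool.not_eq_true] at h
      rw [if_neg (by simp [h]), PySem.Dict.getD_of_not_contains d 0 h, zero_add]
  rw [hfun, PySem.Dict.foldl_insert_getD_add_one_eq_counter, PySem.Dict.items_counter,
    PySem.List.foldl_add, zero_add, List.map_map]
  have hmap : ((fun kv : Int × Int => PySem.Int.floordiv kv.2 2) ∘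
      (fun k => (k, (ar.count k : Int)))) = fun k => (((ar.count k / 2 : Nat)) : Int) := by
    funext k
    exact_mod_cast PySem.Int.floordiv_natCast (ar.count k) 2
  rw [hmap]
  have htf : (PySem.Set.ofList ar).toFinset = ar.toFinset := by
    ext k; simp [PySem.Set.mem_ofList]
  have hsum : (PySem.Set.ofList ar).toFinset.sum (fun k => ar.count k / 2)
      = ((PySem.Set.ofList ar).map (fun k => ar.count k / 2)).sum :=
    List.sum_toFinset _ (PySem.Set.nodup_ofList ar)
  unfold pairsF
  rw [← htf, hsum, Nat.cast_list_sum, List.map_map]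
  rfl

lemma toggle_fold (l : List Int) (s : PySem.Set Int) (p : Int) (hs : s.Nodup) :
    (l.foldl (fun st meia =>
        if PySem.Set.contains st.1 meia then (PySem.Set.discard st.1 meia, st.2 + 1)
        else (PySem.Set.add st.1 meia, st.2)) (s, p)).2
      = p + (pairsF (s ++ l) : Int) := by
  induction l generalizing s p with
  | nil => rw [List.foldl_nil, List.append_nil, pairsF_nodup hs]; simp
  | cons x l ih =>
    by_cases hx : x ∈ s
    · have hcond : PySem.Set.contains s x = true := (PySem.Set.contains_iff s x).mpr hx
      simp only [List.foldl_cons, hcond, if_true]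
      rw [ih (PySem.Set.discard s x) (p + 1) (PySem.Set.nodup_discard s x hs)]
      have hnd : (x :: PySem.Set.discard s x).Nodup := by
        refine List.nodup_cons.mpr ⟨?_, PySem.Set.nodup_discard s x hs⟩
        intro hc; exact ((PySem.Set.mem_discard s x x).mp hc).2 rfl
      have hps : s.Perm (x :: PySem.Set.discard s x) := by
        rw [List.perm_ext_iff_of_nodup hs hnd]
        intro k
        constructor
        · intro hk
          by_cases hkx : k = x
          · exact hkx ▸ List.mem_cons_self
          · exact List.mem_cons_of_mem _ ((PySem.Set.mem_discard s x k).mpr ⟨hk, hkx⟩)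
        · intro hk
          rcases List.mem_cons.mp hk with rfl | hk
          · exact hx
          · exact ((PySem.Set.mem_discard s x k).mp hk).1
      have hperm : (s ++ x :: l).Perm (x :: x :: (PySem.Set.discard s x ++ l)) :=
        (hps.append_right (x :: l)).trans (List.Perm.cons x List.perm_middle)
      rw [pairsF_perm hperm, pairsF_cons_cons]
      push_cast; ring
    · have hcond : PySem.Set.contains s x = false := by
        simp [hx]
      simp only [List.foldl_cons, hcond, Bool.false_eq_true, if_false]
      rw [ih (PySem.Set.add s x) p (PySem.Set.nodup_add s x hs)]
      rw [PySem.Set.add_of_not_mem hx, List.append_assoc]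
      rfl

lemma questao1_alt_eq_pairsF (n : Int) (ar : List Int) :
    questao1_alt n ar = (pairsF ar : Int) := by
  unfold questao1_alt
  rw [toggle_fold ar PySem.Set.empty 0 List.nodup_nil, zero_add]
  rfl

-- ===== VERDICT (by name: the statement is the Claim_ definition above) =====
theorem questao1_spec : Claim_equal_questao1 := by
  intro n ar _
  unfold Spec_questao1
  rw [questao1_eq_pairsF, questao1_alt_eq_pairsF]
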